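-- pv_equiv track=rewrite | github.com/nichnikov/texts-similarities-shingles | duplisearcher-shingles/utils.py | shingle_split
-- ===== SOURCE A (Python) =====
-- from itertools import islice
--
-- def shingle_split(splited_texts: [], shingle: int) -> []:
--     """"""
--     result = []
--     for splited_text in splited_texts:
--         if len(splited_text) <= shingle:
--             result.append(["".join(splited_text)])
--         else:
--             shingles_list = [list(islice(splited_text, int(i), int(i + shingle))) for i in range(len(splited_text))]
--             result.append(["".join(l) for l in shingles_list if len(l) == shingle])
--     return result
-- ===== SOURCE B (Python) =====
-- def shingle_split(splited_texts: [], shingle: int) -> []: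
--     result = []
--     for splited_text in splited_texts:
--         if len(splited_text) <= shingle:
--             result.append(["".join(splited_text)])
--         else:
--             # single pass with a sliding buffer of the last tokens:
--             # each time the buffer fills to `shingle` tokens, emit a window and slide
--             windows = []
--             buf = []
--             for token in splited_text:
--                 buf.append(token)
--                 if len(buf) == shingle:
--                     windows.append("".join(buf))
--                     buf.pop(0)
--             result.append(windows)
--     return result
-- ===== Notes on version B (the rewrite author's own statement) =====
-- stated objective: alternative
-- what changed: A builds a candidate window at every position with islice over an index range and then filters out the short tail windows by length; B makes a single pass over the tokens with a sliding buffer, emitting a joined window each time the buffer fills to `shingle` tokens, so there is no index arithmetic and no length filter.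
-- outside the precondition, e.g. on shingle_split([['a', 'b']], 0): A returns [['', '']], B returns [[]]; on shingle_split([[]], -1): A returns [[]], B returns [[]]
import Mathlib
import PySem

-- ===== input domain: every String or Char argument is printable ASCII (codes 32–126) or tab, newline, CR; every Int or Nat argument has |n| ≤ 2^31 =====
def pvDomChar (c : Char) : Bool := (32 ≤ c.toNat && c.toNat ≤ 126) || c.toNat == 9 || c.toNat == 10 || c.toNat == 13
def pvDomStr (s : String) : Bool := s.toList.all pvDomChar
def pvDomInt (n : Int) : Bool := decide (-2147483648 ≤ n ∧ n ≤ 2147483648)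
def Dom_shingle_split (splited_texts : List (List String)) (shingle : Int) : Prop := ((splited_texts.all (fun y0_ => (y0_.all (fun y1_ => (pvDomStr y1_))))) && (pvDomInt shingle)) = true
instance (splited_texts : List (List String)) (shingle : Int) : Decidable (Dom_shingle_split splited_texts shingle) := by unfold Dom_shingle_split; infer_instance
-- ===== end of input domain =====

-- B replaces A's build-a-window-at-every-position-then-filter-by-length construction with a
-- single pass over the tokens that maintains a sliding buffer; same return value on shingle ≥ 1.

-- ===== PORT A =====
def shingle_split (splited_texts : List (List String)) (shingle : Int) : List (List String) :=
  splited_texts.foldl (fun result splited_text =>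
    if (splited_text.length : Int) ≤ shingle then
      result ++ [[PySem.Str.join "" splited_text]]
    else
      let shingles_list := (PySem.List.pyRange 0 (splited_text.length : Int) 1).map
        (fun i => PySem.List.slice splited_text (some i) (some (i + shingle)))
      result ++ [(shingles_list.filter (fun l => (l.length : Int) == shingle)).map
        (fun l => PySem.Str.join "" l)]) []

-- ===== PORT B =====
-- inner loop: buf.append(token); if len(buf) == shingle: emit "".join(buf); buf.pop(0)
-- (buf.pop(0) drops the head of the just-filled non-empty buffer: .tail is exact there)
def shingle_split_alt (splited_texts : List (List String)) (shingle : Int) : List (List String) :=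
  splited_texts.foldl (fun result splited_text =>
    if (splited_text.length : Int) ≤ shingle then
      result ++ [[PySem.Str.join "" splited_text]]
    else
      let p := splited_text.foldl (fun p token =>
        if ((p.2 ++ [token]).length : Int) == shingle then
          (p.1 ++ [PySem.Str.join "" (p.2 ++ [token])], (p.2 ++ [token]).tail)
        else
          (p.1, p.2 ++ [token])) ([], [])
      result ++ [p.1]) []

-- ===== PRECONDITION & SPEC =====
-- Pre_ excludes shingle ≤ 0: for negative shingle A raises ValueError (islice with a negative
-- stop) whenever some token list is non-empty, and at shingle = 0 the zero-width-window corner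
-- is one nobody would specify — A returns one empty string per position (an artefact of its
-- len==0 filter), B returns no windows; where A does return on negative shingle (all token
-- lists empty) the two agree.
def Pre_shingle_split (splited_texts : List (List String)) (shingle : Int) : Prop :=
  1 ≤ shingle
instance (splited_texts : List (List String)) (shingle : Int) : Decidable (Pre_shingle_split splited_texts shingle) := by unfold Pre_shingle_split; infer_instance

def pvWitness_shingle_split : List (List String) × Int := ([["ab", "c", "d"], []], 2)

def Spec_shingle_split (splited_texts : List (List String)) (shingle : Int) (out : List (List String)) : Prop := out = shingle_split_alt splited_texts shingle
instance (splited_texts : List (List String)) (shingle : Int) (out : List (List String)) : Decidable (Spec_shingle_split splited_texts shingle out) := by unfold Spec_shingle_split; infer_instance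

-- ===== CLAIM (what is proved, stated in full; the proofs are below) =====
def Claim_equal_shingle_split : Prop := ∀ (splited_texts : List (List String)) (shingle : Int), Dom_shingle_split splited_texts shingle → Pre_shingle_split splited_texts shingle → Spec_shingle_split splited_texts shingle (shingle_split splited_texts shingle)

-- ===== LEMMAS AND PROOFS =====

-- the full k-windows of t, front to back (proof-only characterisation shared by both sides);
-- the [] inner case is unreachable for 1 ≤ k
def winRows (t : List String) (k : Nat) : List (List String) :=
  if t.length < k then []
  else match t with
    | [] => []
    | x :: rest => (x :: rest).take k :: winRows rest k
termination_by t.length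

-- A's comprehension+filter over positions yields exactly the full windows, for window size ≥ 1.
lemma windows_eq (t : List String) (k : Nat) (hk : 1 ≤ k) :
    (((List.range t.length).map (fun i => (t.drop i).take k)).filter
        (fun l => (l.length : Int) == (k : Int))).map (fun l => PySem.Str.join "" l)
      = (winRows t k).map (fun l => PySem.Str.join "" l) := by
  induction t with
  | nil => rw [winRows.eq_def, if_pos (by simpa using hk)]; simp
  | cons x rest ih =>
    rw [winRows.eq_def]
    simp only [List.length_cons, List.range_succ_eq_map, List.map_cons, List.map_map,
      List.filter_cons, List.drop_zero, Function.comp_def, List.drop_succ_cons]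
    by_cases hle : k ≤ rest.length + 1
    · have hnotlt : ¬ rest.length + 1 < k := by omega
      have hlen : ((((x :: rest).take k).length : Int) == (k : Int)) = true := by
        simp [List.length_take]; omega
      simp only [hlen, hnotlt, if_true, if_false, List.map_cons, ih]
    · have h1 : rest.length + 1 < k := by omega
      have hlen : ((((x :: rest).take k).length : Int) == (k : Int)) = false := by
        simp [List.length_take]; omega
      have h2 : winRows rest k = [] := by
        rw [winRows.eq_def, if_pos (by omega)]
      rw [h2] at ih
      simp only [hlen, h1, ih, ite_true, Bool.false_eq_true, if_false, List.map_nil]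

-- the sliding-buffer fold emits exactly the full windows of buffer ++ tokens
lemma buffer_fold_eq (k : Nat) (t : List String) :
    ∀ (b : List String) (ws : List String), b.length < k →
      (t.foldl (fun p token =>
        if ((p.2 ++ [token]).length : Int) == (k : Int) then
          (p.1 ++ [PySem.Str.join "" (p.2 ++ [token])], (p.2 ++ [token]).tail)
        else
          (p.1, p.2 ++ [token])) (ws, b)).1
      = ws ++ (winRows (b ++ t) k).map (fun l => PySem.Str.join "" l) := by
  induction t with
  | nil =>
    intro b ws hb
    rw [List.foldl_nil, winRows.eq_def, if_pos (by simpa using hb)]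
    simp
  | cons tok t' ih =>
    intro b ws hb
    rw [List.foldl_cons]
    have hsplit : b ++ tok :: t' = (b ++ [tok]) ++ t' := by simp
    by_cases h : b.length + 1 = k
    · have hbeq : (((b ++ [tok]).length : Int) == (k : Int)) = true := by
        simp [List.length_append]; omega
      obtain ⟨c, cs, hc⟩ : ∃ c cs, b ++ [tok] = c :: cs := by
        cases hb2 : b ++ [tok] with
        | nil => exact absurd hb2 (by simp)
        | cons c cs => exact ⟨c, cs, rfl⟩
      have hlc : cs.length + 1 = k := by
        have := congrArg List.length hc
        simp at this; omega
      have hbeq' : (((c :: cs).length : Int) == (k : Int)) = true := hc ▸ hbeq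
      simp only [hc, hbeq', if_true, List.tail_cons]
      rw [ih cs (ws ++ [PySem.Str.join "" (c :: cs)]) (by omega), hsplit, hc,
        List.cons_append]
      have hwin : winRows (c :: (cs ++ t')) k = ((c :: (cs ++ t')).take k) :: winRows (cs ++ t') k := by
        rw [winRows.eq_def, if_neg (by simp; omega)]
      have htake : (c :: (cs ++ t')).take k = c :: cs := by
        rw [← hlc, List.take_succ_cons, List.take_left' rfl]
      rw [hwin, htake]
      simp
    · have hbeq : (((b ++ [tok]).length : Int) == (k : Int)) = false := by
        simp [List.length_append]; omega
      simp only [hbeq, Bool.false_eq_true, if_false]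
      rw [ih (b ++ [tok]) ws (by simp [List.length_append]; omega), hsplit]

-- A's else branch equals B's else branch.
lemma branchA_eq (t : List String) (shingle : Int) (h1 : 1 ≤ shingle) :
    (((PySem.List.pyRange 0 (t.length : Int) 1).map
        (fun i => PySem.List.slice t (some i) (some (i + shingle)))).filter
          (fun l => (l.length : Int) == shingle)).map (fun l => PySem.Str.join "" l)
      = (t.foldl (fun p token =>
          if ((p.2 ++ [token]).length : Int) == shingle then
            (p.1 ++ [PySem.Str.join "" (p.2 ++ [token])], (p.2 ++ [token]).tail)
          else
            (p.1, p.2 ++ [token])) ([], [])).1 := by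
  obtain ⟨k, hk, rfl⟩ : ∃ k : Nat, 1 ≤ k ∧ shingle = (k : Int) :=
    ⟨shingle.toNat, by omega, by omega⟩
  rw [PySem.List.pyRange_one]
  simp only [sub_zero, Int.toNat_natCast, List.map_map, Function.comp_def, zero_add,
    PySem.List.slice_natCast_add]
  rw [windows_eq t k hk, buffer_fold_eq k t [] [] (by simpa using hk)]
  simp

-- the two loop bodies agree pointwise when 1 ≤ shingle
lemma step_eq (shingle : Int) (h1 : 1 ≤ shingle) (acc : List (List String)) (t : List String) :
    (if (t.length : Int) ≤ shingle then
        acc ++ [[PySem.Str.join "" t]]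
      else
        acc ++ [(((PySem.List.pyRange 0 (t.length : Int) 1).map
            (fun i => PySem.List.slice t (some i) (some (i + shingle)))).filter
              (fun l => (l.length : Int) == shingle)).map (fun l => PySem.Str.join "" l)])
    = (if (t.length : Int) ≤ shingle then
        acc ++ [[PySem.Str.join "" t]]
      else
        acc ++ [(t.foldl (fun p token =>
          if ((p.2 ++ [token]).length : Int) == shingle then
            (p.1 ++ [PySem.Str.join "" (p.2 ++ [token])], (p.2 ++ [token]).tail)
          else
            (p.1, p.2 ++ [token])) ([], [])).1]) := by
  split_ifs with h
  · rfl
  · rw [branchA_eq t shingle h1]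

-- the outer folds agree for 1 ≤ shingle, any accumulator
lemma fold_eq (shingle : Int) (h1 : 1 ≤ shingle) (ts : List (List String)) :
    ∀ acc : List (List String),
      ts.foldl (fun result splited_text =>
        if (splited_text.length : Int) ≤ shingle then
          result ++ [[PySem.Str.join "" splited_text]]
        else
          result ++ [(((PySem.List.pyRange 0 (splited_text.length : Int) 1).map
              (fun i => PySem.List.slice splited_text (some i) (some (i + shingle)))).filter
                (fun l => (l.length : Int) == shingle)).map (fun l => PySem.Str.join "" l)]) acc
      = ts.foldl (fun result splited_text =>
        if (splited_text.length : Int) ≤ shingle then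
          result ++ [[PySem.Str.join "" splited_text]]
        else
          result ++ [(splited_text.foldl (fun p token =>
            if ((p.2 ++ [token]).length : Int) == shingle then
              (p.1 ++ [PySem.Str.join "" (p.2 ++ [token])], (p.2 ++ [token]).tail)
            else
              (p.1, p.2 ++ [token])) ([], [])).1]) acc := by
  induction ts with
  | nil => intro acc; rfl
  | cons t ts ih =>
    intro acc
    simp only [List.foldl_cons]
    rw [step_eq shingle h1 acc t, ih]

-- ===== VERDICT (by name: the statement is the Claim_ definition above) =====
theorem shingle_split_spec : Claim_equal_shingle_split := by
  intro splited_texts shingle _ hpre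
  unfold Spec_shingle_split shingle_split shingle_split_alt
  exact fold_eq shingle hpre splited_texts []
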